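-- pv_equiv track=rewrite | github.com/igivotron/LINMA1691 | for_student/solve.py | solve
-- ===== SOURCE A (Python) =====
-- def solve(adj):
--     scc = tarjan(adj)
--     N = len(scc)
--     influx = [0]*N
--     for i in range(len(adj)):
--         for j in adj[i]:
--             if scc[i] != scc[j]:
--                 influx[scc[j]] += 1
--
--     source = sum(1 for i in influx if i == 0)
--     return source
--
-- class Node:
--     def __init__(self, id, next):
--         self.id = id
--         self.index = None
--         self.lowlink = None
--         self.onStack = False
--         self.next = next
--
-- def tarjan(adj):
--     # Number of nodes
--     N = len(adj)
--
--     # Initialization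
--     nodes = [Node(i, adj[i]) for i in range(N)]
--     index = [0]
--     stack = []
--     SCC_list = [0]
--     dico = {}
--
--     for n in nodes:
--         if n.index == None:
--             strongconnect(n, nodes, index, stack, SCC_list, dico)
--
--     return dico
--
-- def strongconnect(n, nodes, index, stack, SCC_list, dico):
--     n.index = index[0]
--     n.lowlink = index[0]
--     index[0] += 1
--     stack.append(n)
--     n.onStack = True
--
--     for i in n.next:
--         if nodes[i].index == None:
--             strongconnect(nodes[i], nodes, index, stack, SCC_list, dico)
--             n.lowlink = min(n.lowlink, nodes[i].lowlink)
--         elif nodes[i].onStack: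
--             n.lowlink = min(n.lowlink, nodes[i].index)
--
--     if n.lowlink == n.index:
--         while True:
--             w = stack.pop()
--             w.onStack = False
--             dico[w.id] = SCC_list[0]
--             if w.id == n.id:
--                 break
--         SCC_list[0] += 1
-- ===== SOURCE B (Python) =====
-- def solve(adj):
--     # Iterative Tarjan (explicit frame stack + flat arrays) instead of recursion over Node objects;
--     # same source-counting pass over the resulting component labeling.
--     n = len(adj)
--     index = [None] * n
--     low = [None] * n
--     onstack = [False] * n
--     stack = []
--     scc = {}
--     counter = 0
--     next_index = 0
--     for root in range(n):
--         if index[root] is not None: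
--             continue
--         index[root] = low[root] = next_index
--         next_index += 1
--         stack.append(root)
--         onstack[root] = True
--         frames = [(root, 0)]
--         while frames:
--             v, k = frames.pop()
--             pushed = False
--             while k < len(adj[v]):
--                 w = adj[v][k]
--                 k += 1
--                 if index[w] is None:
--                     frames.append((v, k))
--                     index[w] = low[w] = next_index
--                     next_index += 1
--                     stack.append(w)
--                     onstack[w] = True
--                     frames.append((w, 0))
--                     pushed = True
--                     break
--                 elif onstack[w]:
--                     low[v] = min(low[v], index[w])
--             if pushed:
--                 continue
--             if low[v] == index[v]:
--                 while True:
--                     u = stack.pop()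
--                     onstack[u] = False
--                     scc[u] = counter
--                     if u == v:
--                         break
--                 counter += 1
--             if frames:
--                 p = frames[-1][0]
--                 low[p] = min(low[p], low[v])
--     N = len(scc)
--     influx = [0] * N
--     for i in range(len(adj)):
--         for j in adj[i]:
--             if scc[i] != scc[j]:
--                 influx[scc[j]] += 1
--     return sum(1 for x in influx if x == 0)
-- ===== Notes on version B (the rewrite author's own statement) =====
-- stated objective: alternative
-- what changed: A's recursive Tarjan over mutable Node objects (strongconnect recursion, per-node attribute fields) is replaced by an iterative Tarjan: an explicit stack of (node, neighbour-position) frames driving a single while loop over flat arrays, which also avoids Python's recursion limit; the source-counting pass over the resulting component labeling is kept identical by design.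
import Mathlib
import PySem

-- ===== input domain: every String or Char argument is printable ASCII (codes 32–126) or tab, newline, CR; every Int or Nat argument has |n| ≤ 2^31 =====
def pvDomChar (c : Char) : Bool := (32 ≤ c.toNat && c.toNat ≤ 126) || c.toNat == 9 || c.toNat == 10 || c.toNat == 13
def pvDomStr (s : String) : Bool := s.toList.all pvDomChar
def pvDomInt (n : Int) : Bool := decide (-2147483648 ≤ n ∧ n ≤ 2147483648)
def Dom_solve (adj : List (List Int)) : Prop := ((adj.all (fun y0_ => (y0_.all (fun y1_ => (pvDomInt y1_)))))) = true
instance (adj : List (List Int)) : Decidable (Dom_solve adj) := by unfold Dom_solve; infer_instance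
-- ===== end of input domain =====

-- B replaces A's recursive Tarjan over Node objects by an iterative Tarjan with an explicit
-- frame stack and flat arrays (alternative decomposition, no recursion; same counting pass).

-- Python's min on two ints; the `none` cases are unreachable (lowlink/index are always set
-- before being read; Python would raise TypeError on None there, which never happens).
def pyMinO : Option Int → Option Int → Option Int
  | some a, some b => some (min a b)
  | a, _ => a

-- ===== PORT A =====
-- A's Node object (the `next` field is read back from adj; A stores adj[i] there unchanged).
structure NodeA where
  index : Option Int
  low : Option Int
  onS : Bool
deriving Repr, DecidableEq

structure StA where
  nodes : List NodeA
  stack : List Int          -- python list used as a stack; head = top (append/pop at the end)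
  sccCtr : Int              -- SCC_list[0]
  idx : Int                 -- index[0]
  dico : PySem.Dict Int Int
deriving Repr

def getNodeA (s : StA) (i : Nat) : NodeA := s.nodes.getD i ⟨none, none, false⟩

-- n.lowlink = x  (on node v)
def setLowA (v : Nat) (x : Option Int) (s : StA) : StA :=
  { s with nodes := s.nodes.set v { getNodeA s v with low := x } }

-- first lines of strongconnect: n.index = n.lowlink = index[0]; index[0] += 1; stack.append(n); n.onStack = True
def initA (v : Nat) (s : StA) : StA :=
  { s with
    nodes := s.nodes.set v { getNodeA s v with index := some s.idx, low := some s.idx, onS := true },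
    idx := s.idx + 1,
    stack := (v : Int) :: s.stack }

-- the `while True: w = stack.pop() ...` loop (recursion on the stack; empty stack = unreachable IndexError)
def popA (v : Nat) : List Int → StA → StA
  | [], s => s
  | w :: rest, s =>
    let wn := w.toNat
    let s' : StA :=
      { s with nodes := s.nodes.set wn { getNodeA s wn with onS := false },
               stack := rest,
               dico := s.dico.insert w s.sccCtr }
    if w = (v : Int) then s' else popA v rest s'

mutual
-- strongconnect(n, ...); fuel bounds the recursion depth (depth ≤ #nodes; fuel N+1 at the top call never runs out)
def scA (adj : List (List Int)) : Nat → Nat → StA → StA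
  | 0, _, s => s
  | fuel + 1, v, s =>
    let s1 := initA v s
    let s2 := loopA adj fuel v (adj.getD v []) s1
    if (getNodeA s2 v).low = (getNodeA s2 v).index then
      let s3 := popA v s2.stack s2
      { s3 with sccCtr := s3.sccCtr + 1 }
    else s2
termination_by fuel v s => (fuel, 0)
decreasing_by
  exact Prod.Lex.left _ _ (by omega)

-- the `for i in n.next:` loop of strongconnect
def loopA (adj : List (List Int)) : Nat → Nat → List Int → StA → StA
  | _, _, [], s => s
  | fuel, v, i :: rest, s =>
    let w := i.toNat    -- Pre_solve guarantees 0 ≤ i < len(adj); Python raises otherwise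
    match (getNodeA s w).index with
    | none =>
      let s1 := scA adj fuel w s
      let s2 := setLowA v (pyMinO (getNodeA s1 v).low (getNodeA s1 w).low) s1
      loopA adj fuel v rest s2
    | some wi =>
      if (getNodeA s w).onS then
        loopA adj fuel v rest (setLowA v (pyMinO (getNodeA s v).low (some wi)) s)
      else
        loopA adj fuel v rest s
termination_by fuel v l s => (fuel, l.length + 1)
decreasing_by
  all_goals (simp only [List.length_cons]; exact Prod.Lex.right _ (by omega))
end

def tarjanA (adj : List (List Int)) : PySem.Dict Int Int :=
  let N := adj.length
  let s0 : StA := ⟨List.replicate N ⟨none, none, false⟩, [], 0, 0, PySem.Dict.empty⟩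
  let sf := (List.range N).foldl
    (fun s n => if (getNodeA s n).index = none then scA adj (N + 1) n s else s) s0
  sf.dico

-- the counting pass, shared verbatim by A and B (B keeps it identical by design):
-- N = len(scc); influx = [0]*N; for i: for j in adj[i]: if scc[i] != scc[j]: influx[scc[j]] += 1; count zeros
def countSources (adj : List (List Int)) (scc : PySem.Dict Int Int) : Int :=
  let N := scc.items.length
  let influx := (List.range adj.length).foldl (fun acc i =>
      (adj.getD i []).foldl (fun acc2 j =>
        let ci := scc.getD (Int.ofNat i) 0   -- dict lookups; KeyError excluded by Pre_solve
        let cj := scc.getD j 0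
        if ci ≠ cj then acc2.set cj.toNat (acc2.getD cj.toNat 0 + 1) else acc2) acc)
    (List.replicate N (0 : Int))
  influx.foldl (fun c x => if x = 0 then c + 1 else c) (0 : Int)

def solve (adj : List (List Int)) : Int := countSources adj (tarjanA adj)

-- ===== PORT B =====
structure StB where
  index : List (Option Int)
  low : List (Option Int)
  onS : List Bool
  stack : List Int
  sccCtr : Int
  idx : Int
  scc : PySem.Dict Int Int
deriving Repr

-- low[v] = x
def setLowB (v : Nat) (x : Option Int) (s : StB) : StB := { s with low := s.low.set v x }

-- index[w] = low[w] = next_index; next_index += 1; stack.append(w); onstack[w] = True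
def initB (v : Nat) (s : StB) : StB :=
  { s with index := s.index.set v (some s.idx),
           low := s.low.set v (some s.idx),
           idx := s.idx + 1,
           stack := (v : Int) :: s.stack,
           onS := s.onS.set v true }

-- the inner `while k < len(adj[v])` scan; returns `some (w, k')` when an unvisited
-- neighbour w is found (the parent is to be resumed at position k'), `none` when it finishes.
-- The list argument is adj[v][k:] (the port walks the suffix instead of indexing by k).
def scanB (v : Nat) : Nat → List Int → StB → Option (Nat × Nat) × StB
  | _, [], s => (none, s)
  | k, i :: rest, s =>
    let w := i.toNat
    match s.index[w]? with   -- out-of-range w (IndexError in Python) is treated as a skip; excluded by Pre_solve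
    | some none => (some (w, k + 1), s)
    | some (some wi) =>
      if s.onS.getD w false then
        scanB v (k + 1) rest (setLowB v (pyMinO (s.low.getD v none) (some wi)) s)
      else scanB v (k + 1) rest s
    | none => scanB v (k + 1) rest s

-- the `while True: u = stack.pop() ...` pop loop
def popB (v : Nat) : List Int → StB → StB
  | [], s => s
  | w :: rest, s =>
    let wn := w.toNat
    let s' : StB := { s with onS := s.onS.set wn false,
                             stack := rest,
                             scc := s.scc.insert w s.sccCtr }
    if w = (v : Int) then s' else popB v rest s'

-- `if frames: p = frames[-1][0]; low[p] = min(low[p], low[v])`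
def minTopB (frames : List (Nat × Nat)) (v : Nat) (t : StB) : StB :=
  match frames with
  | (p, _) :: _ => setLowB p (pyMinO (t.low.getD p none) (t.low.getD v none)) t
  | [] => t

def countNoneO (l : List (Option Int)) : Nat := l.countP (·.isNone)

-- lemmas cited by runM's decreasing_by (the port needs them for termination)
theorem scanB_snd_index : ∀ (v k : Nat) (l : List Int) (s : StB),
    ((scanB v k l s).2).index = s.index := by
  intro v k l
  induction l generalizing k with
  | nil => intro s; simp [scanB]
  | cons i rest ih =>
    intro s
    simp only [scanB]
    split
    · rfl
    · split
      · exact ih (k + 1) _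
      · exact ih (k + 1) _
    · exact ih (k + 1) _

theorem scanB_push_none : ∀ (v k : Nat) (l : List Int) (s : StB) (w k' : Nat) (s' : StB),
    scanB v k l s = (some (w, k'), s') → s'.index[w]? = some none := by
  intro v k l
  induction l generalizing k with
  | nil => intro s w k' s' h; simp [scanB] at h
  | cons i rest ih =>
    intro s w k' s' h
    simp only [scanB] at h
    split at h
    · rename_i heq
      simp only [Prod.mk.injEq, Option.some.injEq] at h
      obtain ⟨⟨hw, _⟩, hs⟩ := h
      subst hs; rw [← hw]; exact heq
    · split at h
      · exact ih (k + 1) _ _ _ _ h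
      · exact ih (k + 1) _ _ _ _ h
    · exact ih (k + 1) _ _ _ _ h

theorem popB_index : ∀ (v : Nat) (st : List Int) (s : StB), (popB v st s).index = s.index := by
  intro v st
  induction st with
  | nil => intro s; simp [popB]
  | cons w rest ih =>
    intro s
    simp only [popB]
    split
    · rfl
    · exact ih _

theorem minTopB_index (frames : List (Nat × Nat)) (v : Nat) (t : StB) :
    (minTopB frames v t).index = t.index := by
  cases frames with
  | nil => rfl
  | cons f fs => cases f; rfl

theorem countNoneO_set_lt (l : List (Option Int)) (i : Nat) (x : Int)
    (h : l[i]? = some none) : countNoneO (l.set i (some x)) < countNoneO l := by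
  induction l generalizing i with
  | nil => simp at h
  | cons a t ih =>
    cases i with
    | zero =>
      simp only [List.getElem?_cons_zero, Option.some.injEq] at h
      subst h
      simp [countNoneO]
    | succ j =>
      have h' : t[j]? = some none := by simpa using h
      have := ih j h'
      simp only [List.set_cons_succ, countNoneO, List.countP_cons] at *
      omega

def runM (adj : List (List Int)) : List (Nat × Nat) → StB → StB
  | [], s => s
  | (v, k) :: frames, s =>
    match h : scanB v k ((adj.getD v []).drop k) s with
    | (some (w, k'), s1) => runM adj ((w, 0) :: (v, k') :: frames) (initB w s1)
    | (none, s1) =>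
      let s2 := if s1.low.getD v none = s1.index.getD v none then
          let s3 := popB v s1.stack s1
          { s3 with sccCtr := s3.sccCtr + 1 }
        else s1
      runM adj frames (minTopB frames v s2)
termination_by frames s => (countNoneO s.index, frames.length)
decreasing_by
  · apply Prod.Lex.left
    have h1 : s1.index = s.index := by
      have h2 := scanB_snd_index v k ((adj.getD v []).drop k) s
      rw [h] at h2; exact h2
    have h2 : s1.index[w]? = some none := scanB_push_none v k _ s w k' s1 h
    show countNoneO (initB w s1).index < countNoneO s.index
    rw [← h1]
    exact countNoneO_set_lt _ _ _ h2
  · have h1 : s1.index = s.index := by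
      have h2 := scanB_snd_index v k ((adj.getD v []).drop k) s
      rw [h] at h2; exact h2
    have key : ∀ t : StB, t.index = s.index →
        Prod.Lex (· < ·) (· < ·)
          (countNoneO (minTopB frames v t).index, frames.length)
          (countNoneO s.index, frames.length + 1) := by
      intro t ht
      rw [minTopB_index, ht]
      exact Prod.Lex.right _ (by omega)
    apply key
    split
    · simp [popB_index, h1]
    · exact h1

def tarjanB (adj : List (List Int)) : PySem.Dict Int Int :=
  let N := adj.length
  let s0 : StB := ⟨List.replicate N none, List.replicate N none, List.replicate N false,
                   [], 0, 0, PySem.Dict.empty⟩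
  let sf := (List.range N).foldl
    (fun s r => if s.index.getD r none = none then runM adj [(r, 0)] (initB r s) else s) s0
  sf.scc

def solve_alt (adj : List (List Int)) : Int := countSources adj (tarjanB adj)

-- ===== PRECONDITION & SPEC =====
-- Pre_solve: a well-formed adjacency list (every neighbour index in [0, len(adj))).
-- Outside it A raises: IndexError for j ≥ len(adj) in strongconnect, KeyError for negative j
-- in the counting pass (scc is keyed by the non-negative node ids).
def Pre_solve (adj : List (List Int)) : Prop :=
  ∀ row ∈ adj, ∀ j ∈ row, 0 ≤ j ∧ j < (adj.length : Int)
instance (adj : List (List Int)) : Decidable (Pre_solve adj) := by unfold Pre_solve; infer_instance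

def pvWitness_solve : List (List Int) := [[1], [0], [1]]

def Spec_solve (adj : List (List Int)) (out : Int) : Prop := out = solve_alt adj
instance (adj : List (List Int)) (out : Int) : Decidable (Spec_solve adj out) := by unfold Spec_solve; infer_instance

-- ===== CLAIM (what is proved, stated in full; the proofs are below) =====
def Claim_equal_solve : Prop := ∀ (adj : List (List Int)), Dom_solve adj → Pre_solve adj → Spec_solve adj (solve adj)

-- ===== LEMMAS AND PROOFS =====

-- the abstraction from A's state to B's state (proof-only)
def toB (s : StA) : StB :=
  ⟨s.nodes.map (·.index), s.nodes.map (·.low), s.nodes.map (·.onS),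
   s.stack, s.sccCtr, s.idx, s.dico⟩

-- the tail of strongconnect resumed at neighbour position k: finish the neighbour loop, then the pop phase
def finishA (adj : List (List Int)) (fuel v k : Nat) (s : StA) : StA :=
  let s2 := loopA adj fuel v ((adj.getD v []).drop k) s
  if (getNodeA s2 v).low = (getNodeA s2 v).index then
    let s3 := popA v s2.stack s2
    { s3 with sccCtr := s3.sccCtr + 1 }
  else s2

def unvisA (s : StA) : Nat := countNoneO (s.nodes.map (·.index))

-- getD commutes with map when the defaults correspond
theorem map_getD {α β : Type} (l : List α) (f : α → β) (i : Nat) (d : α) :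
    (l.map f).getD i (f d) = f (l.getD i d) := by
  simp only [List.getD_eq_getElem?_getD, List.getElem?_map]
  cases l[i]? <;> rfl

theorem set_getD_self {α : Type} (l : List α) (i : Nat) (d : α) :
    l.set i (l.getD i d) = l := by
  induction l generalizing i with
  | nil => rfl
  | cons a t ih =>
    cases i with
    | zero => rfl
    | succ j => simp only [List.getD_cons_succ, List.set_cons_succ, ih]

theorem toB_index_getD (s : StA) (i : Nat) :
    (toB s).index.getD i none = (getNodeA s i).index :=
  map_getD s.nodes (·.index) i ⟨none, none, false⟩

theorem toB_low_getD (s : StA) (i : Nat) :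
    (toB s).low.getD i none = (getNodeA s i).low :=
  map_getD s.nodes (·.low) i ⟨none, none, false⟩

theorem toB_onS_getD (s : StA) (i : Nat) :
    (toB s).onS.getD i false = (getNodeA s i).onS :=
  map_getD s.nodes (·.onS) i ⟨none, none, false⟩

theorem getNodeA_eq (s : StA) (i : Nat) (h : i < s.nodes.length) :
    getNodeA s i = s.nodes[i] := List.getD_eq_getElem s.nodes _ h

theorem toB_index_getElem (s : StA) (i : Nat) (h : i < s.nodes.length) :
    (toB s).index[i]? = some ((getNodeA s i).index) := by
  simp only [toB, List.getElem?_map, List.getElem?_eq_getElem h, Option.map_some,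
    getNodeA_eq s i h]

-- setting a field back to its own value is a no-op on the mapped list
theorem map_set_node {β : Type} (s : StA) (f : NodeA → β) (v : Nat) :
    (s.nodes.map f).set v (f (getNodeA s v)) = s.nodes.map f := by
  rw [getNodeA, ← map_getD s.nodes f v ⟨none, none, false⟩, set_getD_self]

theorem toB_setLow (v : Nat) (x : Option Int) (s : StA) :
    setLowB v x (toB s) = toB (setLowA v x s) := by
  simp only [setLowB, setLowA, toB, List.map_set, StB.mk.injEq, and_true, true_and]
  exact ⟨(map_set_node s (fun x => x.index) v).symm, (map_set_node s (fun x => x.onS) v).symm⟩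

theorem toB_initA (v : Nat) (s : StA) :
    initB v (toB s) = toB (initA v s) := by
  simp [initB, initA, toB, List.map_set]

theorem toB_pop (v : Nat) (st : List Int) (s : StA) :
    popB v st (toB s) = toB (popA v st s) := by
  induction st generalizing s with
  | nil => rfl
  | cons w rest ih =>
    simp only [popB, popA]
    have hs : ({ toB s with
          onS := (toB s).onS.set w.toNat false,
          stack := rest,
          scc := (toB s).scc.insert w (toB s).sccCtr } : StB)
        = toB { s with
            nodes := s.nodes.set w.toNat { getNodeA s w.toNat with onS := false },
            stack := rest,
            dico := s.dico.insert w s.sccCtr } := by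
      simp only [toB, List.map_set, StB.mk.injEq, and_true]
      exact ⟨(map_set_node s (fun x => x.index) w.toNat).symm,
             (map_set_node s (fun x => x.low) w.toNat).symm⟩
    rw [hs]
    split
    · rfl
    · exact ih _

theorem countNoneO_set_le (l : List (Option Int)) (i : Nat) (x : Int) :
    countNoneO (l.set i (some x)) ≤ countNoneO l := by
  induction l generalizing i with
  | nil => simp [countNoneO]
  | cons a t ih =>
    cases i with
    | zero =>
      simp only [List.set_cons_zero, countNoneO, List.countP_cons, Option.isNone_some,
        Bool.false_eq_true, if_false, Nat.add_zero]
      exact Nat.le_add_right _ _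
    | succ j =>
      have := ih j
      simp only [List.set_cons_succ, countNoneO, List.countP_cons] at *
      omega

theorem countNoneO_pos (l : List (Option Int)) (i : Nat) (h : l[i]? = some none) :
    0 < countNoneO l := by
  induction l generalizing i with
  | nil => simp at h
  | cons a t ih =>
    cases i with
    | zero =>
      simp only [List.getElem?_cons_zero, Option.some.injEq] at h
      subst h; simp [countNoneO]
    | succ j =>
      have h' : t[j]? = some none := by simpa using h
      have := ih j h'
      simp only [countNoneO, List.countP_cons] at *
      omega

theorem countNoneO_le_length (l : List (Option Int)) : countNoneO l ≤ l.length :=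
  List.countP_le_length

-- lengths and the unvisited count through A's state operations
theorem unvisA_setLow (v : Nat) (x : Option Int) (s : StA) :
    unvisA (setLowA v x s) = unvisA s := by
  have h := toB_setLow v x s
  have : (setLowB v x (toB s)).index = (toB (setLowA v x s)).index := congrArg StB.index h
  simp only [setLowB] at this
  unfold unvisA
  show countNoneO (toB (setLowA v x s)).index = countNoneO (toB s).index
  rw [← this]

theorem unvisA_pop (v : Nat) (st : List Int) (s : StA) :
    unvisA (popA v st s) = unvisA s := by
  have h := toB_pop v st s
  have : (popB v st (toB s)).index = (toB (popA v st s)).index := congrArg StB.index h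
  rw [popB_index] at this
  unfold unvisA
  show countNoneO (toB (popA v st s)).index = countNoneO (toB s).index
  rw [← this]

theorem lenA_setLow (v : Nat) (x : Option Int) (s : StA) :
    (setLowA v x s).nodes.length = s.nodes.length := by
  simp [setLowA]

theorem lenA_pop (v : Nat) (st : List Int) (s : StA) :
    (popA v st s).nodes.length = s.nodes.length := by
  induction st generalizing s with
  | nil => rfl
  | cons w rest ih =>
    simp only [popA]
    split
    · simp
    · rw [ih]; simp

theorem lenA_init (v : Nat) (s : StA) :
    (initA v s).nodes.length = s.nodes.length := by
  simp [initA]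

theorem unvisA_init_le (v : Nat) (s : StA) : unvisA (initA v s) ≤ unvisA s := by
  unfold unvisA initA
  simp only [List.map_set]
  exact countNoneO_set_le _ _ _

-- joint preservation of length and the unvisited count by scA/loopA
theorem loopA_pres (adj : List (List Int)) (fuel : Nat)
    (hsc : ∀ v s, unvisA (scA adj fuel v s) ≤ unvisA s ∧
      (scA adj fuel v s).nodes.length = s.nodes.length) :
    ∀ (l : List Int) (v : Nat) (s : StA), unvisA (loopA adj fuel v l s) ≤ unvisA s ∧
      (loopA adj fuel v l s).nodes.length = s.nodes.length := by
  intro l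
  induction l with
  | nil => intro v s; simp [loopA]
  | cons i rest ih =>
    intro v s
    simp only [loopA]
    cases hc : (getNodeA s i.toNat).index with
    | none =>
      obtain ⟨h1, h2⟩ := hsc i.toNat s
      obtain ⟨h3, h4⟩ := ih v (setLowA v (pyMinO (getNodeA (scA adj fuel i.toNat s) v).low
        (getNodeA (scA adj fuel i.toNat s) i.toNat).low) (scA adj fuel i.toNat s))
      constructor
      · calc _ ≤ _ := h3
          _ = _ := unvisA_setLow _ _ _
          _ ≤ _ := h1
      · rw [h4, lenA_setLow, h2]
    | some wi =>
      by_cases ho : (getNodeA s i.toNat).onS = true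
      · simp only [ho, if_true]
        obtain ⟨h3, h4⟩ := ih v (setLowA v (pyMinO (getNodeA s v).low (some wi)) s)
        constructor
        · calc _ ≤ _ := h3
            _ = _ := unvisA_setLow _ _ _
        · rw [h4, lenA_setLow]
      · simp only [ho, if_false]
        exact ih v s

theorem scA_pres (adj : List (List Int)) :
    ∀ (fuel : Nat) (v : Nat) (s : StA), unvisA (scA adj fuel v s) ≤ unvisA s ∧
      (scA adj fuel v s).nodes.length = s.nodes.length := by
  intro fuel
  induction fuel with
  | zero => intro v s; simp [scA]
  | succ fuel ih =>
    intro v s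
    simp only [scA]
    obtain ⟨h1, h2⟩ := loopA_pres adj fuel ih (adj.getD v []) v (initA v s)
    split
    · constructor
      · show unvisA { popA v _ _ with sccCtr := _ } ≤ _
        have hu : unvisA { popA v (loopA adj fuel v (adj.getD v []) (initA v s)).stack
            (loopA adj fuel v (adj.getD v []) (initA v s)) with
            sccCtr := (popA v (loopA adj fuel v (adj.getD v []) (initA v s)).stack
              (loopA adj fuel v (adj.getD v []) (initA v s))).sccCtr + 1 }
            = unvisA (popA v (loopA adj fuel v (adj.getD v []) (initA v s)).stack
              (loopA adj fuel v (adj.getD v []) (initA v s))) := rfl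
        rw [hu, unvisA_pop]
        exact le_trans h1 (unvisA_init_le v s)
      · show ({ popA v _ _ with sccCtr := _ } : StA).nodes.length = _
        rw [show ∀ t : StA, ({ t with sccCtr := t.sccCtr + 1 } : StA).nodes.length
          = t.nodes.length from fun _ => rfl, lenA_pop, h2, lenA_init]
    · exact ⟨le_trans h1 (unvisA_init_le v s), by rw [h2, lenA_init]⟩

-- unfolding equations for runM keyed by the scan result
theorem runM_push (adj : List (List Int)) (v k : Nat) (frames : List (Nat × Nat)) (s : StB)
    (w k' : Nat) (s1 : StB) (h : scanB v k ((adj.getD v []).drop k) s = (some (w, k'), s1)) :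
    runM adj ((v, k) :: frames) s = runM adj ((w, 0) :: (v, k') :: frames) (initB w s1) := by
  rw [runM]
  split
  · rename_i w0 k0 s0 heq
    rw [h] at heq
    simp only [Prod.mk.injEq, Option.some.injEq] at heq
    obtain ⟨⟨hw, hk⟩, hs⟩ := heq
    rw [hw, hk, hs]
  · rename_i s0 heq
    rw [h] at heq
    simp at heq

theorem runM_finish (adj : List (List Int)) (v k : Nat) (frames : List (Nat × Nat)) (s : StB)
    (s1 : StB) (h : scanB v k ((adj.getD v []).drop k) s = (none, s1)) :
    runM adj ((v, k) :: frames) s = runM adj frames (minTopB frames v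
      (if s1.low.getD v none = s1.index.getD v none then
        { popB v s1.stack s1 with sccCtr := (popB v s1.stack s1).sccCtr + 1 }
      else s1)) := by
  rw [runM]
  split
  · rename_i w0 k0 s0 heq
    rw [h] at heq
    simp at heq
  · rename_i s0 heq
    rw [h] at heq
    simp only [Prod.mk.injEq] at heq
    rw [heq.2]

theorem scA_eq_finishA (adj : List (List Int)) (fuel v : Nat) (s : StA) :
    scA adj (fuel + 1) v s = finishA adj fuel v 0 (initA v s) := by
  rw [scA, finishA, List.drop_zero]

theorem runM_nil (adj : List (List Int)) (s : StB) : runM adj [] s = s := by rw [runM]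

theorem runM_congr (adj : List (List Int)) (v k k' : Nat) (frames : List (Nat × Nat))
    (s s' : StB)
    (h : scanB v k ((adj.getD v []).drop k) s = scanB v k' ((adj.getD v []).drop k') s') :
    runM adj ((v, k) :: frames) s = runM adj ((v, k') :: frames) s' := by
  rcases hres : scanB v k' ((adj.getD v []).drop k') s' with ⟨o, s1⟩
  cases o with
  | some p =>
    rcases p with ⟨w0, k0⟩
    rw [runM_push _ _ _ _ _ _ _ _ (h.trans hres), runM_push _ _ _ _ _ _ _ _ hres]
  | none =>
    rw [runM_finish _ _ _ _ _ _ (h.trans hres), runM_finish _ _ _ _ _ _ hres]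

-- THE SIMULATION LEMMA: one resumed strongconnect frame of A equals the machine of B
theorem mainL (adj : List (List Int)) (hPre : Pre_solve adj) :
    ∀ (fuel : Nat) (l : List Int) (v k : Nat) (frames : List (Nat × Nat)) (s : StA),
      s.nodes.length = adj.length → v < adj.length → unvisA s ≤ fuel →
      l = (adj.getD v []).drop k →
      runM adj ((v, k) :: frames) (toB s) =
        runM adj frames (minTopB frames v (toB (finishA adj fuel v k s))) := by
  intro fuel
  induction fuel using Nat.strong_induction_on with
  | _ fuel IHf =>
  intro l
  induction l with
  | nil =>
    intro v k frames s hlen hv hfuel hd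
    have hscan : scanB v k ((adj.getD v []).drop k) (toB s) = (none, toB s) := by
      rw [← hd]; rfl
    have hfin : finishA adj fuel v k s =
        (if (getNodeA s v).low = (getNodeA s v).index then
          { popA v s.stack s with sccCtr := (popA v s.stack s).sccCtr + 1 } else s) := by
      rw [finishA, ← hd]
      simp only [loopA]
    rw [runM_finish adj v k frames (toB s) (toB s) hscan, hfin]
    congr 1
    congr 1
    by_cases hg : (getNodeA s v).low = (getNodeA s v).index
    · simp only [toB_low_getD, toB_index_getD, hg, if_true]
      have hstk : (toB s).stack = s.stack := rfl
      rw [hstk, toB_pop]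
      rfl
    · simp only [toB_low_getD, toB_index_getD, hg, if_false]
  | cons i rest ihl =>
    intro v k frames s hlen hv hfuel hd
    have hiMem : i ∈ adj.getD v [] := by
      have hm : i ∈ (adj.getD v []).drop k := by rw [← hd]; exact List.mem_cons_self
      exact List.mem_of_mem_drop hm
    have hrow : adj.getD v [] ∈ adj := by
      rw [List.getD_eq_getElem _ _ hv]; exact List.getElem_mem hv
    have hbound := hPre _ hrow i hiMem
    have hw : i.toNat < adj.length := by omega
    have hwlen : i.toNat < s.nodes.length := by rw [hlen]; exact hw
    have hIdxB : (toB s).index[i.toNat]? = some ((getNodeA s i.toNat).index) :=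
      toB_index_getElem s _ hwlen
    have hrest : rest = (adj.getD v []).drop (k + 1) := by
      have h1 : (adj.getD v []).drop (k + 1) = ((adj.getD v []).drop k).drop 1 := by
        rw [List.drop_drop]
      rw [h1, ← hd]; simp
    cases hc : (getNodeA s i.toNat).index with
    | none =>
      have hnone : (s.nodes.map (fun x => x.index))[i.toNat]? = some none := by
        rw [show s.nodes.map (fun x : NodeA => x.index) = (toB s).index from rfl, hIdxB, hc]
      have hpos : 0 < unvisA s := countNoneO_pos _ i.toNat hnone
      obtain ⟨fuel', rfl⟩ : ∃ f', fuel = f' + 1 := ⟨fuel - 1, by omega⟩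
      have hscan : scanB v k ((adj.getD v []).drop k) (toB s) = (some (i.toNat, k + 1), toB s) := by
        rw [← hd]
        simp only [scanB, hIdxB, hc]
      rw [runM_push adj v k frames (toB s) i.toNat (k + 1) (toB s) hscan, toB_initA]
      have hltu : unvisA (initA i.toNat s) < unvisA s := by
        unfold unvisA initA
        simp only [List.map_set]
        exact countNoneO_set_lt _ _ _ hnone
      have hchild := IHf fuel' (by omega) (adj.getD i.toNat []) i.toNat 0
        ((v, k + 1) :: frames) (initA i.toNat s)
        (by rw [lenA_init]; exact hlen) hw (by omega) (List.drop_zero (l := adj.getD i.toNat [])).symm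
      rw [hchild]
      have hX : finishA adj fuel' i.toNat 0 (initA i.toNat s) = scA adj (fuel' + 1) i.toNat s :=
        (scA_eq_finishA adj fuel' i.toNat s).symm
      rw [show minTopB ((v, k + 1) :: frames) i.toNat (toB (finishA adj fuel' i.toNat 0 (initA i.toNat s)))
          = setLowB v (pyMinO ((toB (finishA adj fuel' i.toNat 0 (initA i.toNat s))).low.getD v none)
              ((toB (finishA adj fuel' i.toNat 0 (initA i.toNat s))).low.getD i.toNat none))
              (toB (finishA adj fuel' i.toNat 0 (initA i.toNat s))) from rfl]
      rw [toB_low_getD, toB_low_getD, toB_setLow, hX]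
      have hpres := scA_pres adj (fuel' + 1) i.toNat s
      have hlen2 : (setLowA v (pyMinO (getNodeA (scA adj (fuel' + 1) i.toNat s) v).low
          (getNodeA (scA adj (fuel' + 1) i.toNat s) i.toNat).low) (scA adj (fuel' + 1) i.toNat s)).nodes.length
          = adj.length := by
        rw [lenA_setLow, hpres.2, hlen]
      have hu2 : unvisA (setLowA v (pyMinO (getNodeA (scA adj (fuel' + 1) i.toNat s) v).low
          (getNodeA (scA adj (fuel' + 1) i.toNat s) i.toNat).low) (scA adj (fuel' + 1) i.toNat s))
          ≤ fuel' + 1 := by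
        rw [unvisA_setLow]
        exact le_trans hpres.1 hfuel
      rw [ihl v (k + 1) frames _ hlen2 hv hu2 hrest]
      have hfin : finishA adj (fuel' + 1) v k s = finishA adj (fuel' + 1) v (k + 1)
          (setLowA v (pyMinO (getNodeA (scA adj (fuel' + 1) i.toNat s) v).low
            (getNodeA (scA adj (fuel' + 1) i.toNat s) i.toNat).low) (scA adj (fuel' + 1) i.toNat s)) := by
        rw [finishA, finishA, ← hd, ← hrest]
        have hstep : loopA adj (fuel' + 1) v (i :: rest) s
            = loopA adj (fuel' + 1) v rest (setLowA v
                (pyMinO (getNodeA (scA adj (fuel' + 1) i.toNat s) v).low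
                  (getNodeA (scA adj (fuel' + 1) i.toNat s) i.toNat).low) (scA adj (fuel' + 1) i.toNat s)) := by
          simp only [loopA, hc]
        rw [hstep]
      rw [hfin]
    | some wi =>
      by_cases ho : (getNodeA s i.toNat).onS = true
      · have hscan : scanB v k ((adj.getD v []).drop k) (toB s)
            = scanB v (k + 1) ((adj.getD v []).drop (k + 1))
                (toB (setLowA v (pyMinO (getNodeA s v).low (some wi)) s)) := by
          rw [← hd, ← hrest]
          simp only [scanB, hIdxB, hc, toB_onS_getD, ho, if_true, toB_low_getD, toB_setLow]
        rw [runM_congr adj v k (k + 1) frames (toB s) _ hscan]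
        have hlen2 : (setLowA v (pyMinO (getNodeA s v).low (some wi)) s).nodes.length = adj.length := by
          rw [lenA_setLow, hlen]
        have hu2 : unvisA (setLowA v (pyMinO (getNodeA s v).low (some wi)) s) ≤ fuel := by
          rw [unvisA_setLow]; exact hfuel
        rw [ihl v (k + 1) frames _ hlen2 hv hu2 hrest]
        have hfin : finishA adj fuel v k s
            = finishA adj fuel v (k + 1) (setLowA v (pyMinO (getNodeA s v).low (some wi)) s) := by
          rw [finishA, finishA, ← hd, ← hrest]
          have hstep : loopA adj fuel v (i :: rest) s
              = loopA adj fuel v rest (setLowA v (pyMinO (getNodeA s v).low (some wi)) s) := by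
            simp only [loopA, hc, ho, if_true]
          rw [hstep]
        rw [hfin]
      · have hscan : scanB v k ((adj.getD v []).drop k) (toB s)
            = scanB v (k + 1) ((adj.getD v []).drop (k + 1)) (toB s) := by
          rw [← hd, ← hrest]
          simp only [scanB, hIdxB, hc, toB_onS_getD, ho, Bool.false_eq_true, if_false]
        rw [runM_congr adj v k (k + 1) frames (toB s) _ hscan]
        rw [ihl v (k + 1) frames s hlen hv hfuel hrest]
        have hfin : finishA adj fuel v k s = finishA adj fuel v (k + 1) s := by
          rw [finishA, finishA, ← hd, ← hrest]
          have hstep : loopA adj fuel v (i :: rest) s = loopA adj fuel v rest s := by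
            simp only [loopA, hc, ho, Bool.false_eq_true, if_false]
          rw [hstep]
        rw [hfin]

theorem tarjan_corr (adj : List (List Int)) (hPre : Pre_solve adj) :
    tarjanB adj = tarjanA adj := by
  have key : ∀ (ns : List Nat) (s : StA), (∀ n ∈ ns, n < adj.length) →
      s.nodes.length = adj.length →
      ns.foldl (fun t r => if t.index.getD r none = none then runM adj [(r, 0)] (initB r t) else t)
          (toB s)
        = toB (ns.foldl (fun t n => if (getNodeA t n).index = none
            then scA adj (adj.length + 1) n t else t) s) := by
    intro ns
    induction ns with
    | nil => intro s _ _; rfl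
    | cons n ns ih =>
      intro s hns hlen
      simp only [List.foldl_cons]
      by_cases hcase : (getNodeA s n).index = none
      · rw [if_pos (by rw [toB_index_getD, hcase]), if_pos hcase, toB_initA]
        have hufuel : unvisA (initA n s) ≤ adj.length := by
          have h1 := countNoneO_le_length ((initA n s).nodes.map (fun x => x.index))
          rw [List.length_map, lenA_init, hlen] at h1
          exact h1
        have hm := mainL adj hPre adj.length (adj.getD n []) n 0 [] (initA n s)
          (by rw [lenA_init]; exact hlen) (hns n List.mem_cons_self) hufuel
          (List.drop_zero (l := adj.getD n [])).symm
        rw [hm]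
        rw [show minTopB [] n (toB (finishA adj adj.length n 0 (initA n s)))
            = toB (finishA adj adj.length n 0 (initA n s)) from rfl]
        rw [runM_nil, ← scA_eq_finishA]
        exact ih _ (fun m hm' => hns m (List.mem_cons_of_mem _ hm'))
          (by rw [(scA_pres adj (adj.length + 1) n s).2, hlen])
      · rw [if_neg (by rw [toB_index_getD]; exact hcase), if_neg hcase]
        exact ih s (fun m hm' => hns m (List.mem_cons_of_mem _ hm')) hlen
  show (List.foldl (fun s r => if s.index.getD r none = none
        then runM adj [(r, 0)] (initB r s) else s)
      ⟨List.replicate adj.length none, List.replicate adj.length none,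
        List.replicate adj.length false, [], 0, 0, PySem.Dict.empty⟩
      (List.range adj.length)).scc
    = (List.foldl (fun s n => if (getNodeA s n).index = none
          then scA adj (adj.length + 1) n s else s)
        ⟨List.replicate adj.length ⟨none, none, false⟩, [], 0, 0, PySem.Dict.empty⟩
        (List.range adj.length)).dico
  have h0 : (⟨List.replicate adj.length none, List.replicate adj.length none,
        List.replicate adj.length false, [], 0, 0, PySem.Dict.empty⟩ : StB)
      = toB ⟨List.replicate adj.length ⟨none, none, false⟩, [], 0, 0, PySem.Dict.empty⟩ := by
    simp [toB, List.map_replicate]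
  rw [h0, key (List.range adj.length) _ (fun m hm' => List.mem_range.mp hm') (by simp)]
  rfl


theorem solve_spec : Claim_equal_solve := by
  intro adj _ hPre
  unfold Spec_solve solve solve_alt
  rw [tarjan_corr adj hPre]
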